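-- pv_equiv track=rewrite | github.com/allinne/advent2024 | 01b.py | read_lists
-- ===== SOURCE A (Python) =====
-- def parse_line(line):
--     '''
--     >>> parse_line('15259   96330')
--     (15259, 96330)
--     '''
--
--     n1, n2 = [int(s) for s in line.split()]
--     return (n1, n2)
--
-- def read_lists(lines_array):
--     '''
--     >>> read_lists(['15259   96330', '81076   52363'])
--     ([15259, 81076], [96330, 52363])
--     '''
--
--     left_column = []
--     right_column = []
--     for l in lines_array:
--         parsed_line = parse_line(l)
--         left_column.append(parsed_line[0])
--         right_column.append(parsed_line[1])
--
--     return (left_column, right_column)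
-- ===== SOURCE B (Python) =====
-- def _unzip_pairs(nums):
--     if not nums:
--         return ([], [])
--     left, right = _unzip_pairs(nums[2:])
--     return ([nums[0]] + left, [nums[1]] + right)
--
-- def read_lists(lines_array):
--     nums = [int(tok) for line in lines_array for tok in line.split()]
--     return _unzip_pairs(nums)
-- ===== Notes on version B (the rewrite author's own statement) =====
-- stated objective: alternative
-- what changed: B flattens the whole input into one token stream of ints and then unzips it by recursion that consumes two numbers at a time and conses onto the result, instead of A's per-line parse loop appending simultaneously to two accumulator lists.
import Mathlib
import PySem

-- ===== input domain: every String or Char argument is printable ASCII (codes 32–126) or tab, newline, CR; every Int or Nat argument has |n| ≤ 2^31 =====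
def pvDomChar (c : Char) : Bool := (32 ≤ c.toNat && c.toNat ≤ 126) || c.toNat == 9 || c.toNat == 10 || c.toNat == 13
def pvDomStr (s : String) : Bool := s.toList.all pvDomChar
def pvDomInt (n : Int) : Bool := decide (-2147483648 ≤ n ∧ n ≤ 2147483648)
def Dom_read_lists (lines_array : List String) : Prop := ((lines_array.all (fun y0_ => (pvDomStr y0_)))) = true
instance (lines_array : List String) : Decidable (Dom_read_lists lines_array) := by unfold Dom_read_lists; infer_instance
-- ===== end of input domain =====

-- B flattens all lines into one token stream of ints and unzips it by recursion two
-- numbers at a time (consing), instead of A's per-line loop appending to two lists.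

-- ===== PORT A =====
-- parse_line: '[int(s) for s in line.split()]' then unpack into exactly two; none = ValueError (excluded by Pre_)
def pvParseLine (line : String) : Option (Int × Int) :=
  match (PySem.Str.split₀ line).map PySem.Int.ofStr? with
  | [some n1, some n2] => some (n1, n2)
  | _ => none

-- the for-loop of A, carrying the two accumulator columns; the none branch is unreachable under Pre_
def pvReadLoop : List String → List Int × List Int → List Int × List Int
  | [], acc => acc
  | l :: ls, (left_column, right_column) =>
    match pvParseLine l with
    | some parsed_line =>
        pvReadLoop ls (left_column ++ [parsed_line.1], right_column ++ [parsed_line.2])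
    | none => (left_column, right_column)

def read_lists (lines_array : List String) : List Int × List Int :=
  pvReadLoop lines_array ([], [])

-- ===== PORT B =====
-- _unzip_pairs: recursion consuming two numbers at a time; a one-element list raises
-- IndexError in Python (unreachable under Pre_), ported as the ([a], []) stand-in.
def pvUnzipPairs : List Int → List Int × List Int
  | [] => ([], [])
  | [a] => ([a], [])
  | a :: b :: rest =>
    let p := pvUnzipPairs rest
    (a :: p.1, b :: p.2)

-- int(tok) raising ValueError is unreachable under Pre_, ported as getD 0
def read_lists_alt (lines_array : List String) : List Int × List Int :=
  pvUnzipPairs (lines_array.flatMap fun l =>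
    (PySem.Str.split₀ l).map (fun s => (PySem.Int.ofStr? s).getD 0))

-- ===== PRECONDITION & SPEC =====
-- Pre_: every line splits into exactly two int()-parsable tokens; otherwise Python A raises ValueError.
def Pre_read_lists (lines_array : List String) : Prop :=
  (lines_array.all fun l =>
    match (PySem.Str.split₀ l).map PySem.Int.ofStr? with
    | [some _, some _] => true
    | _ => false) = true
instance (lines_array : List String) : Decidable (Pre_read_lists lines_array) := by
  unfold Pre_read_lists; infer_instance

def pvWitness_read_lists : List String := (["7 -2"])

def Spec_read_lists (lines_array : List String) (out : List Int × List Int) : Prop := out = read_lists_alt lines_array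
instance (lines_array : List String) (out : List Int × List Int) : Decidable (Spec_read_lists lines_array out) := by unfold Spec_read_lists; infer_instance

-- ===== CLAIM =====
def Claim_equal_read_lists : Prop := ∀ (lines_array : List String), Dom_read_lists lines_array → Pre_read_lists lines_array → Spec_read_lists lines_array (read_lists lines_array)

-- ===== LEMMAS AND PROOFS =====

-- a line passing Pre_'s per-line check parses to some pair, and its token ints are exactly that pair
theorem pvLine_ok (l : String)
    (h : (match (PySem.Str.split₀ l).map PySem.Int.ofStr? with
          | [some _, some _] => true
          | _ => false) = true) :
    ∃ n1 n2, pvParseLine l = some (n1, n2) ∧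
      (PySem.Str.split₀ l).map (fun s => (PySem.Int.ofStr? s).getD 0) = [n1, n2] := by
  unfold pvParseLine
  revert h
  cases hs : PySem.Str.split₀ l with
  | nil => simp
  | cons s1 t =>
    cases t with
    | nil => cases PySem.Int.ofStr? s1 <;> simp
    | cons s2 t2 =>
      cases t2 with
      | cons _ _ =>
        cases PySem.Int.ofStr? s1 <;> cases PySem.Int.ofStr? s2 <;> simp
      | nil =>
        cases h1 : PySem.Int.ofStr? s1 with
        | none => simp [h1]
        | some n1 =>
          cases h2 : PySem.Int.ofStr? s2 with
          | none => simp [h1, h2]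
          | some n2 => intro _; exact ⟨n1, n2, by simp [h1, h2]⟩

-- A's loop, with accumulators pulled out
theorem pvReadLoop_acc (ls : List String) :
    (ls.all fun l =>
      match (PySem.Str.split₀ l).map PySem.Int.ofStr? with
      | [some _, some _] => true
      | _ => false) = true →
    ∀ L R : List Int,
    pvReadLoop ls (L, R) =
      (L ++ (ls.map (fun l => (pvParseLine l).getD (0, 0))).map Prod.fst,
       R ++ (ls.map (fun l => (pvParseLine l).getD (0, 0))).map Prod.snd) := by
  induction ls with
  | nil => intro _ L R; simp [pvReadLoop]
  | cons l ls ih =>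
    intro h L R
    simp only [List.all_cons, Bool.and_eq_true] at h
    obtain ⟨hl, hls⟩ := h
    obtain ⟨n1, n2, hp, _⟩ := pvLine_ok l hl
    simp [pvReadLoop, hp, ih hls]

-- B's flat recursion equals the per-line pair decomposition, under Pre_
theorem pvUnzip_flat (ls : List String)
    (h : (ls.all fun l =>
      match (PySem.Str.split₀ l).map PySem.Int.ofStr? with
      | [some _, some _] => true
      | _ => false) = true) :
    pvUnzipPairs (ls.flatMap fun l =>
        (PySem.Str.split₀ l).map (fun s => (PySem.Int.ofStr? s).getD 0)) =
      ((ls.map (fun l => (pvParseLine l).getD (0, 0))).map Prod.fst,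
       (ls.map (fun l => (pvParseLine l).getD (0, 0))).map Prod.snd) := by
  induction ls with
  | nil => simp [pvUnzipPairs]
  | cons l ls ih =>
    simp only [List.all_cons, Bool.and_eq_true] at h
    obtain ⟨hl, hls⟩ := h
    obtain ⟨n1, n2, hp, htok⟩ := pvLine_ok l hl
    simp [List.flatMap_cons, htok, pvUnzipPairs, hp, ih hls]

-- ===== VERDICT =====
theorem read_lists_spec : Claim_equal_read_lists := by
  intro lines_array _ hpre
  unfold Spec_read_lists read_lists read_lists_alt
  rw [pvReadLoop_acc lines_array hpre [] [], pvUnzip_flat lines_array hpre]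
  simp
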